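-- pv_equiv track=rewrite | github.com/katrinagallacher/tokenization-newsletter | src/filter.py | categorize_selections
-- ===== SOURCE A (Python) =====
-- def categorize_selections(papers: list[dict]) -> dict:
--     """Categorize top papers into newsletter sections.
--
--     Returns dict with:
--         text_papers: up to 5 academic papers on text/linguistics
--         text_blogs: up to 3 blog posts on text/linguistics
--         other_papers: up to 3 papers on audio/video/robotics/other
--     """
--     academic = [p for p in papers if p.get("source") in ("arxiv", "semantic_scholar", "google_scholar")]
--     non_academic = [p for p in papers if p.get("source") not in ("arxiv", "semantic_scholar", "google_scholar")]
--
--     text_papers = [p for p in academic if p.get("topic") == "text"][:5]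
--     text_blogs = [p for p in non_academic if p.get("topic") == "text"][:3]
--     other_papers = [p for p in academic if p.get("topic") == "other"][:3]
--
--     # If we have fewer text papers, fill from other; vice versa
--     selected_titles = {p.get("title") for p in text_papers + text_blogs + other_papers}
--
--     # Fill remaining text paper slots
--     if len(text_papers) < 5:
--         for p in academic:
--             if p.get("title") not in selected_titles and p.get("topic") == "text":
--                 text_papers.append(p)
--                 selected_titles.add(p.get("title"))
--                 if len(text_papers) >= 5:
--                     break
--
--     # Fill remaining other paper slots from unused academic
--     if len(other_papers) < 3:
--         for p in academic:
--             if p.get("title") not in selected_titles and p.get("topic") == "other":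
--                 other_papers.append(p)
--                 selected_titles.add(p.get("title"))
--                 if len(other_papers) >= 3:
--                     break
--
--     return {
--         "text_papers": text_papers,
--         "text_blogs": text_blogs,
--         "other_papers": other_papers,
--     }
-- ===== SOURCE B (Python) =====
-- def categorize_selections(papers: list[dict]) -> dict:
--     """Single cap-guarded pass over papers; same sections as A."""
--     ACADEMIC = {"arxiv", "semantic_scholar", "google_scholar"}
--     text_papers, text_blogs, other_papers = [], [], []
--     for p in papers:
--         academic = p.get("source") in ACADEMIC
--         topic = p.get("topic")
--         if topic == "text":
--             if academic:
--                 if len(text_papers) < 5: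
--                     text_papers.append(p)
--             elif len(text_blogs) < 3:
--                 text_blogs.append(p)
--         elif topic == "other" and academic and len(other_papers) < 3:
--             other_papers.append(p)
--     return {
--         "text_papers": text_papers,
--         "text_blogs": text_blogs,
--         "other_papers": other_papers,
--     }
-- ===== Notes on version B (the rewrite author's own statement) =====
-- stated objective: simpler
-- what changed: Replaced A's five comprehensions plus seen-title-set fill loops (which are provably no-ops) by a single cap-guarded pass over papers appending each paper to at most one section.
import Mathlib
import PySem

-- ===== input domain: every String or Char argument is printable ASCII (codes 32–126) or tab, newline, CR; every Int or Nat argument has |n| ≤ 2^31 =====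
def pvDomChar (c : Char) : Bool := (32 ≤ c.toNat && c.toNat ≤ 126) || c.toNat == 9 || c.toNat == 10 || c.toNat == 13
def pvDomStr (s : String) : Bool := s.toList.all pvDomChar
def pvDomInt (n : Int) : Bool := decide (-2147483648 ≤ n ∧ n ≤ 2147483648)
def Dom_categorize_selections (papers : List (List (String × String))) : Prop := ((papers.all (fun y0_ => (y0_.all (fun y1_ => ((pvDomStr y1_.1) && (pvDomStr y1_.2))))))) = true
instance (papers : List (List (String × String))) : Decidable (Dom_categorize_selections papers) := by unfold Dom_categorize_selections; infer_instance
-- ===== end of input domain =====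

-- B is one cap-guarded pass over `papers` instead of A's five comprehensions plus two fill loops
-- (which are provably no-ops); objective: simpler. Return value only (A mutates nothing observable).

-- ===== PORT A =====
-- p.get(k) on a paper dict (assoc list, first match)
def pvGet (p : List (String × String)) (k : String) : Option String :=
  (PySem.Dict.mk p).get? k

-- p.get("source") in ("arxiv", "semantic_scholar", "google_scholar")
def pvIsAcad (p : List (String × String)) : Bool :=
  pvGet p "source" == some "arxiv" || pvGet p "source" == some "semantic_scholar" ||
    pvGet p "source" == some "google_scholar"

-- A's fill loop: for p in academic: if title not in seen and topic matches: append, add, break at cap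
def pvFillA (cap : Nat) (topic : String) :
    List (List (String × String)) → List (List (String × String)) →
    PySem.Set (Option String) → List (List (String × String)) × PySem.Set (Option String)
  | [], acc, seen => (acc, seen)
  | p :: rest, acc, seen =>
    if !(seen.contains (pvGet p "title")) && (pvGet p "topic" == some topic) then
      let acc' := acc ++ [p]
      let seen' := PySem.Set.add seen (pvGet p "title")
      if cap ≤ acc'.length then (acc', seen')
      else pvFillA cap topic rest acc' seen'
    else pvFillA cap topic rest acc seen

def categorize_selections (papers : List (List (String × String))) :
    List (String × List (List (String × String))) :=
  let academic := papers.filter (fun p => pvIsAcad p)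
  let non_academic := papers.filter (fun p => !pvIsAcad p)
  let text_papers := (academic.filter (fun p => pvGet p "topic" == some "text")).take 5
  let text_blogs := (non_academic.filter (fun p => pvGet p "topic" == some "text")).take 3
  let other_papers := (academic.filter (fun p => pvGet p "topic" == some "other")).take 3
  let seen := PySem.Set.ofList ((text_papers ++ text_blogs ++ other_papers).map (fun p => pvGet p "title"))
  let st :=
    if text_papers.length < 5 then pvFillA 5 "text" academic text_papers seen
    else (text_papers, seen)
  let text_papers := st.1
  let seen := st.2
  let other_papers :=
    if other_papers.length < 3 then (pvFillA 3 "other" academic other_papers seen).1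
    else other_papers
  [("text_papers", text_papers), ("text_blogs", text_blogs), ("other_papers", other_papers)]

-- ===== PORT B =====
-- the single pass of Source B, carrying the three sections
def pvGoB : List (List (String × String)) → List (List (String × String)) →
    List (List (String × String)) → List (List (String × String)) →
    List (String × List (List (String × String)))
  | [], tp, tb, op => [("text_papers", tp), ("text_blogs", tb), ("other_papers", op)]
  | p :: rest, tp, tb, op =>
    let academic := pvIsAcad p
    let topic := pvGet p "topic"
    if topic == some "text" then
      if academic then
        if tp.length < 5 then pvGoB rest (tp ++ [p]) tb op else pvGoB rest tp tb op
      else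
        if tb.length < 3 then pvGoB rest tp (tb ++ [p]) op else pvGoB rest tp tb op
    else
      if topic == some "other" && academic && decide (op.length < 3) then
        pvGoB rest tp tb (op ++ [p])
      else pvGoB rest tp tb op

def categorize_selections_alt (papers : List (List (String × String))) :
    List (String × List (List (String × String))) :=
  pvGoB papers [] [] []

-- ===== PRECONDITION & SPEC =====
def Spec_categorize_selections (papers : List (List (String × String))) (out : List (String × List (List (String × String)))) : Prop := out = categorize_selections_alt papers
instance (papers : List (List (String × String))) (out : List (String × List (List (String × String)))) : Decidable (Spec_categorize_selections papers out) := by unfold Spec_categorize_selections; infer_instance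

-- ===== CLAIM (what is proved, stated in full; the proofs are below) =====
def Claim_equal_categorize_selections : Prop := ∀ (papers : List (List (String × String))), Dom_categorize_selections papers → Spec_categorize_selections papers (categorize_selections papers)

-- ===== LEMMAS AND PROOFS =====

-- the three predicates B's single pass selects on
def pvPT (p : List (String × String)) : Bool := pvIsAcad p && (pvGet p "topic" == some "text")
def pvPB (p : List (String × String)) : Bool := !pvIsAcad p && (pvGet p "topic" == some "text")
def pvPO (p : List (String × String)) : Bool := pvIsAcad p && (pvGet p "topic" == some "other")

lemma take_append_cons {α : Type} (acc : List α) (p : α) (xs : List α) (c : Nat)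
    (h : acc.length < c) :
    acc ++ (p :: xs).take (c - acc.length) = (acc ++ [p]) ++ xs.take (c - (acc ++ [p]).length) := by
  have h1 : c - acc.length = (c - (acc.length + 1)) + 1 := by omega
  simp [h1, List.take_succ_cons]

lemma pvGoB_eq (l : List (List (String × String))) :
    ∀ tp tb op, pvGoB l tp tb op =
      [("text_papers", tp ++ (l.filter pvPT).take (5 - tp.length)),
       ("text_blogs", tb ++ (l.filter pvPB).take (3 - tb.length)),
       ("other_papers", op ++ (l.filter pvPO).take (3 - op.length))] := by
  induction l with
  | nil => intro tp tb op; simp [pvGoB]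
  | cons p rest ih =>
    intro tp tb op
    by_cases ht : pvGet p "topic" == some "text"
    · by_cases ha : pvIsAcad p
      · have hPT : pvPT p = true := by simp [pvPT, ha, ht]
        have hPB : pvPB p = false := by simp [pvPB, ha]
        have hPO : pvPO p = false := by
          simp only [pvPO, ha, Bool.true_and]
          simp_all [pvGet]
        by_cases hc : tp.length < 5
        · simp only [pvGoB, ht, ha, if_pos hc, if_true, ih,
            List.filter_cons, hPT, hPB, hPO, if_true, if_false]
          rw [take_append_cons tp p _ 5 hc]
          simp
        · have h0 : 5 - tp.length = 0 := by omega
          simp [pvGoB, ht, ha, hc, ih, List.filter_cons, hPT, hPB, hPO, h0]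
      · have hPT : pvPT p = false := by simp [pvPT, ha]
        have hPB : pvPB p = true := by simp [pvPB, ha, ht]
        have hPO : pvPO p = false := by simp [pvPO, ha]
        by_cases hc : tb.length < 3
        · simp only [pvGoB, ht, ha, if_pos hc, if_true, Bool.false_eq_true, if_false, ih,
            List.filter_cons, hPT, hPB, hPO]
          rw [take_append_cons tb p _ 3 hc]
        · have h0 : 3 - tb.length = 0 := by omega
          simp [pvGoB, ht, ha, hc, ih, List.filter_cons, hPT, hPB, hPO, h0]
    · have hPT : pvPT p = false := by simp [pvPT, ht]
      have hPB : pvPB p = false := by simp [pvPB, ht]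
      by_cases ho : pvPO p
      · by_cases hc : op.length < 3
        · simp only [pvGoB, ht, Bool.false_eq_true, if_false]
          have : (pvGet p "topic" == some "other" && pvIsAcad p && decide (op.length < 3)) = true := by
            have := ho; simp only [pvPO, Bool.and_eq_true] at this
            simp [this.1, this.2, hc]
          simp only [this, if_true, ih, List.filter_cons, hPT, hPB, ho, if_true,
            Bool.false_eq_true, if_false]
          rw [take_append_cons op p _ 3 hc]
        · have h0 : 3 - op.length = 0 := by omega
          have : (pvGet p "topic" == some "other" && pvIsAcad p && decide (op.length < 3)) = false := by
            simp [hc]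
          simp [pvGoB, ht, this, ih, List.filter_cons, hPT, hPB, ho, h0]
      · have : (pvGet p "topic" == some "other" && pvIsAcad p && decide (op.length < 3)) = false := by
          by_cases h1 : pvGet p "topic" == some "other"
          · by_cases h2 : pvIsAcad p
            · exact absurd (show pvPO p = true by simp [pvPO, h1, h2]) ho
            · simp [h2]
          · simp [h1]
        simp [pvGoB, ht, this, ih, List.filter_cons, hPT, hPB, ho]

-- A's fill loop does nothing when every matching paper's title is already seen
lemma pvFillA_noop (cap : Nat) (topic : String) (l : List (List (String × String))) :
    ∀ acc seen, (∀ p ∈ l, pvGet p "topic" == some topic → seen.contains (pvGet p "title") = true) →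
      pvFillA cap topic l acc seen = (acc, seen) := by
  induction l with
  | nil => intro acc seen _; rfl
  | cons p rest ih =>
    intro acc seen h
    have hcond : (!(seen.contains (pvGet p "title")) && (pvGet p "topic" == some topic)) = false := by
      by_cases ht : pvGet p "topic" == some topic
      · rw [h p (by simp) ht]; simp
      · simp [ht]
    simp only [pvFillA, hcond, Bool.false_eq_true, if_false]
    exact ih acc seen (fun q hq => h q (by simp [hq]))

lemma filter_acad_topic (papers : List (List (String × String))) (P : List (String × String) → Bool) :
    (papers.filter (fun p => pvIsAcad p)).filter P
      = papers.filter (fun p => pvIsAcad p && P p) := by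
  rw [List.filter_filter]
  apply List.filter_congr
  intro a _
  rw [Bool.and_comm]

lemma filter_nonacad_topic (papers : List (List (String × String))) (P : List (String × String) → Bool) :
    (papers.filter (fun p => !pvIsAcad p)).filter P
      = papers.filter (fun p => !pvIsAcad p && P p) := by
  rw [List.filter_filter]
  apply List.filter_congr
  intro a _
  rw [Bool.and_comm]

-- under-cap slice keeps every matching paper, so its title is in the seen set
lemma seen_of_under_cap (papers : List (List (String × String))) (c : Nat) (P : List (String × String) → Bool)
    (sels : List (Option String))
    (hlen : ((papers.filter P).take c).length < c)
    (p : List (String × String)) (hp : p ∈ papers) (hP : P p = true)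
    (hsub : ∀ q ∈ (papers.filter P).take c, pvGet q "title" ∈ sels) :
    (PySem.Set.ofList sels).contains (pvGet p "title") = true := by
  have htake : (papers.filter P).take c = papers.filter P := by
    apply List.take_of_length_le
    by_contra hlt
    push_neg at hlt
    rw [List.length_take] at hlen
    omega
  have hmem : p ∈ (papers.filter P).take c := by
    rw [htake]; exact List.mem_filter.mpr ⟨hp, hP⟩
  have hmem' : pvGet p "title" ∈ sels := hsub p hmem
  simpa [List.contains_iff_mem, PySem.Set.mem_ofList] using hmem'

-- ===== VERDICT (by name: the statement is the Claim_ definition above) =====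
theorem categorize_selections_spec : Claim_equal_categorize_selections := by
  intro papers _
  unfold Spec_categorize_selections categorize_selections categorize_selections_alt
  rw [pvGoB_eq]
  simp only [List.length_nil, List.nil_append, Nat.sub_zero]
  rw [filter_acad_topic, filter_acad_topic, filter_nonacad_topic]
  set TP := papers.filter pvPT with hTP
  set TB := papers.filter pvPB with hTB
  set OP := papers.filter pvPO with hOP
  -- names for A's intermediate lists
  have eTP : papers.filter (fun p => pvIsAcad p && (pvGet p "topic" == some "text")) = TP := rfl
  have eTB : papers.filter (fun p => !pvIsAcad p && (pvGet p "topic" == some "text")) = TB := rfl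
  have eOP : papers.filter (fun p => pvIsAcad p && (pvGet p "topic" == some "other")) = OP := rfl
  rw [eTP, eTB, eOP]
  set seen := PySem.Set.ofList ((TP.take 5 ++ TB.take 3 ++ OP.take 3).map (fun p => pvGet p "title")) with hseen
  have hsub : ∀ q ∈ TP.take 5 ++ TB.take 3 ++ OP.take 3,
      pvGet q "title" ∈ (TP.take 5 ++ TB.take 3 ++ OP.take 3).map (fun p => pvGet p "title") :=
    fun q hq => List.mem_map.mpr ⟨q, hq, rfl⟩
  have hfill1 : (if (TP.take 5).length < 5 then pvFillA 5 "text" (papers.filter (fun p => pvIsAcad p)) (TP.take 5) seen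
      else (TP.take 5, seen)) = (TP.take 5, seen) := by
    by_cases h5 : (TP.take 5).length < 5
    · rw [if_pos h5]
      apply pvFillA_noop
      intro p hp ht
      have hpap : p ∈ papers := (List.mem_filter.mp hp).1
      have hac : pvIsAcad p = true := by
        have := (List.mem_filter.mp hp).2; simpa using this
      have hP : pvPT p = true := by simp [pvPT, hac, ht]
      exact seen_of_under_cap papers 5 pvPT _ h5 p hpap hP
        (fun q hq => hsub q (List.mem_append_left _ (List.mem_append_left _ hq)))
    · rw [if_neg h5]
  rw [hfill1]
  have hfill2 : (if (OP.take 3).length < 3 then (pvFillA 3 "other" (papers.filter (fun p => pvIsAcad p)) (OP.take 3) seen).1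
      else OP.take 3) = OP.take 3 := by
    by_cases h3 : (OP.take 3).length < 3
    · rw [if_pos h3]
      rw [pvFillA_noop 3 "other" _ _ seen ?_]
      intro p hp ht
      have hpap : p ∈ papers := (List.mem_filter.mp hp).1
      have hac : pvIsAcad p = true := by
        have := (List.mem_filter.mp hp).2; simpa using this
      have hP : pvPO p = true := by simp [pvPO, hac, ht]
      exact seen_of_under_cap papers 3 pvPO _ h3 p hpap hP
        (fun q hq => hsub q (List.mem_append_right _ hq))
    · rw [if_neg h3]
  rw [hfill2]
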